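-- pv_equiv track=rewrite | github.com/Kalyan-udd/DSA-data-structures-and-algorithms- | leetcode/contest/weekly_492.py | SmallestBalancedIndex
-- ===== SOURCE A (Python) =====
-- def SmallestBalancedIndex(nums: list[int]):
--     n = len(nums)
--     product = nums[n-1]
--     sum_ = 0
--     for i in range(n-2, -1, -1):
--         sum_ += nums[i]
--     for i in range(n-2, 0, -1):
--         sum_ -= nums[i]
--         if sum_ == product:
--             return i
--         product = product * nums[i]
--     return -1
-- ===== SOURCE B (Python) =====
-- def SmallestBalancedIndex(nums: list[int]):
--     n = len(nums)
--     # suffix[i] = product of nums[i+1:], built in one right-to-left accumulation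
--     suffix = [1]
--     p = 1
--     for x in reversed(nums[1:]):
--         p *= x
--         suffix.append(p)
--     suffix.reverse()
--     best = -1
--     prefix = 0
--     for i in range(1, n - 1):
--         prefix += nums[i - 1]
--         if prefix == suffix[i]:
--             best = i
--     return best
-- ===== Notes on version B (the rewrite author's own statement) =====
-- stated objective: alternative
-- what changed: A scans once right-to-left carrying running sum/product accumulators and early-returns; B first materializes the suffix-product table in one backward pass, then scans the indices left-to-right keeping the last balanced index.
import Mathlib
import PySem

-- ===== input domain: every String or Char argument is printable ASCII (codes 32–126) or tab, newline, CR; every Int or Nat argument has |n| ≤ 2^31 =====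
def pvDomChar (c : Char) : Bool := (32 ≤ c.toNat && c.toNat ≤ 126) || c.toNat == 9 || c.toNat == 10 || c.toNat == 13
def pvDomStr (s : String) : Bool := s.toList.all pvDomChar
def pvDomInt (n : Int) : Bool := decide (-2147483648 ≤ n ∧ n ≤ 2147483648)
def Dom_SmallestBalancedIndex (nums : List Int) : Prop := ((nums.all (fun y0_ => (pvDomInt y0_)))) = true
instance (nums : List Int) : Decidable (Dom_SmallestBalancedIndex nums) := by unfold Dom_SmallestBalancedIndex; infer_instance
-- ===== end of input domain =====

-- B replaces A's two accumulator loops (descending scan with early return) by materialized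
-- suffix-product array + ascending keep-last scan; objective: alternative decomposition, not faster.


-- ===== PORT A =====
-- second loop of A: for i in range(n-2, 0, -1): sum_ -= nums[i]; if sum_ == product: return i; product *= nums[i]
-- (indices are always in range here, so pyGetD is exact for nums[i])
def pvALoop (nums : List Int) : List Int → Int → Int → Int
  | [], _, _ => -1
  | i :: rest, s, p =>
    let s' := s - PySem.List.pyGetD nums i 0
    if s' = p then i
    else pvALoop nums rest s' (p * PySem.List.pyGetD nums i 0)

def SmallestBalancedIndex (nums : List Int) : Int :=
  let n : Int := nums.length
  -- product = nums[n-1]; raises IndexError iff nums = [] (excluded by Pre_); in range otherwise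
  let product := PySem.List.pyGetD nums (n - 1) 0
  -- for i in range(n-2, -1, -1): sum_ += nums[i]
  let sum0 := (PySem.List.pyRange (n - 2) (-1) (-1)).foldl (fun s i => s + PySem.List.pyGetD nums i 0) 0
  pvALoop nums (PySem.List.pyRange (n - 2) 0 (-1)) sum0 product

-- ===== PORT B =====
def SmallestBalancedIndex_alt (nums : List Int) : Int :=
  let n : Int := nums.length
  -- suffix = [1]; p = 1; for x in reversed(nums[1:]): p *= x; suffix.append(p);  suffix.reverse()
  let ps := (PySem.List.slice nums (some 1) none).reverse.foldl
      (fun (st : Int × List Int) x => (st.1 * x, st.2 ++ [st.1 * x])) (1, [1])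
  let suffix := ps.2.reverse
  -- best = -1; prefix = 0; for i in range(1, n-1): prefix += nums[i-1]; if prefix == suffix[i]: best = i
  -- (indices i-1 and i are always in range here, so pyGetD is exact)
  let res := (PySem.List.pyRange 1 (n - 1) 1).foldl
      (fun (st : Int × Int) i =>
        let pfx := st.2 + PySem.List.pyGetD nums (i - 1) 0
        (if pfx = PySem.List.pyGetD suffix i 0 then i else st.1, pfx))
      (-1, 0)
  res.1

-- ===== PRECONDITION & SPEC =====
-- Pre_ excludes only the empty list, on which A raises IndexError (nums[n-1] with n = 0).
def Pre_SmallestBalancedIndex (nums : List Int) : Prop := nums ≠ []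
instance (nums : List Int) : Decidable (Pre_SmallestBalancedIndex nums) := by unfold Pre_SmallestBalancedIndex; infer_instance
def pvWitness_SmallestBalancedIndex : List Int := [1, 2, 3, 3]

def Spec_SmallestBalancedIndex (nums : List Int) (out : Int) : Prop := out = SmallestBalancedIndex_alt nums
instance (nums : List Int) (out : Int) : Decidable (Spec_SmallestBalancedIndex nums out) := by unfold Spec_SmallestBalancedIndex; infer_instance

-- ===== CLAIM (what is proved, stated in full; the proofs are below) =====
def Claim_equal_SmallestBalancedIndex : Prop := ∀ (nums : List Int), Dom_SmallestBalancedIndex nums → Pre_SmallestBalancedIndex nums → Spec_SmallestBalancedIndex nums (SmallestBalancedIndex nums)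

-- ===== LEMMAS AND PROOFS =====

-- prefix sum of the first i elements / product of the elements after index i
def pvPref (nums : List Int) (i : Nat) : Int := (nums.take i).sum
def pvSufp (nums : List Int) (i : Nat) : Int := (nums.drop (i + 1)).prod
def pvP (nums : List Int) (i : Nat) : Bool := decide (pvPref nums i = pvSufp nums i)

-- A's second loop returns the first index of the descending list [k, …, 1] that is balanced.
theorem pvALoop_eq (nums : List Int) (k : Nat) (hk : k + 2 ≤ nums.length) :
    pvALoop nums (((List.range' 1 k).map (Int.ofNat)).reverse) (pvPref nums (k+1)) (pvSufp nums k)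
      = ((((List.range' 1 k).reverse.find? (pvP nums)).map (Int.ofNat)).getD (-1)) := by
  induction k with
  | zero => simp [pvALoop]
  | succ k ih =>
    have hlt : k + 1 < nums.length := by omega
    have hrc : List.range' 1 (k + 1) = List.range' 1 k ++ [k + 1] := by
      simpa [Nat.add_comm] using List.range'_concat (s := 1) (n := k) (step := 1)
    have hget : PySem.List.pyGetD nums (Int.ofNat (k + 1)) 0 = nums[k + 1] := by
      rw [show (Int.ofNat (k + 1)) = ((k + 1 : Nat) : Int) from rfl, PySem.List.pyGetD_natCast]
      simp [List.getD, List.getElem?_eq_getElem hlt]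
    have hs : pvPref nums (k + 1 + 1) - nums[k + 1] = pvPref nums (k + 1) := by
      unfold pvPref; rw [List.sum_take_succ nums (k + 1) hlt]; ring
    have hp : pvSufp nums (k + 1) * nums[k + 1] = pvSufp nums k := by
      unfold pvSufp
      rw [List.drop_eq_getElem_cons hlt, List.prod_cons]
      exact mul_comm _ _
    rw [hrc, List.map_append, List.reverse_append]
    simp only [List.map_cons, List.map_nil, List.reverse_cons, List.reverse_nil,
      List.nil_append, List.cons_append]
    simp only [pvALoop, hget]
    rw [hs]
    by_cases hc : pvPref nums (k + 1) = pvSufp nums (k + 1)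
    · simp [hc, pvP]
    · simp only [hc, if_false, hp]
      simpa [pvP, hc] using ih (by omega)

-- generic: folding (s + f i) over a list is adding the mapped sum
theorem pvFoldAdd (f : Int → Int) (l : List Int) (c : Int) :
    l.foldl (fun s i => s + f i) c = c + (l.map f).sum := by
  induction l generalizing c with
  | nil => simp
  | cons x l ih => simp [List.foldl, ih (c + f x)]; ring

theorem pvMapRange (nums : List Int) (k : Nat) (hk : k ≤ nums.length) :
    (PySem.List.pyRange 0 (k : Int) 1).map (fun i => PySem.List.pyGetD nums i 0) = nums.take k := by
  induction k with
  | zero => simp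
  | succ k ih =>
    have h1 : ((k : Int) + 1) = ((k + 1 : Nat) : Int) := by push_cast; ring
    have h2 : PySem.List.pyRange 0 ((k : Int) + 1) 1 = PySem.List.pyRange 0 (k : Int) 1 ++ [(k : Int)] :=
      PySem.List.pyRange_one_succ_right (by positivity)
    have hk' : k < nums.length := by omega
    rw [← h1, h2, List.map_append, ih (by omega), List.take_add_one]
    simp [PySem.List.pyGetD_natCast, List.getD, hk']

-- B's suffix construction
theorem pvSuffixFold (l : List Int) :
    l.reverse.foldl (fun (st : Int × List Int) x => (st.1 * x, st.2 ++ [st.1 * x])) (1, [1])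
      = (l.prod, ((List.range (l.length + 1)).map (fun k => (l.drop k).prod)).reverse) := by
  induction l with
  | nil => simp
  | cons x l ih =>
    have hmap : (List.range ((x :: l).length + 1)).map (fun k => ((x :: l).drop k).prod)
        = (x :: l).prod :: (List.range (l.length + 1)).map (fun k => (l.drop k).prod) := by
      rw [show (x :: l).length + 1 = (l.length + 1) + 1 from rfl, List.range_succ_eq_map]
      simp [List.map_map, Function.comp]
    rw [List.reverse_cons, List.foldl_append, ih, hmap]
    simp [List.foldl, mul_comm]

-- B's scan loop keeps the LAST balanced index of the ascending list = first of the reversed list.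
theorem pvBLoop_eq (nums : List Int) (suffix : List Int)
    (hs : ∀ i : Nat, i < nums.length → PySem.List.pyGetD suffix (i : Int) 0 = pvSufp nums i)
    (k : Nat) (hk : k + 1 ≤ nums.length) (b : Int) :
    ((List.range' 1 k).map (Int.ofNat)).foldl
      (fun (st : Int × Int) i =>
        let pfx := st.2 + PySem.List.pyGetD nums (i - 1) 0
        (if pfx = PySem.List.pyGetD suffix i 0 then i else st.1, pfx)) (b, 0)
      = (((((List.range' 1 k).reverse.find? (pvP nums)).map (Int.ofNat)).getD b), pvPref nums k) := by
  induction k with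
  | zero => simp [pvPref]
  | succ k ih =>
    have hlt : k < nums.length := by omega
    have hrc : List.range' 1 (k + 1) = List.range' 1 k ++ [k + 1] := by
      simpa [Nat.add_comm] using List.range'_concat (s := 1) (n := k) (step := 1)
    have hcast : (Int.ofNat (k + 1)) - 1 = Int.ofNat k := by
      rw [show (Int.ofNat (k + 1)) = ((k + 1 : Nat) : Int) from rfl,
        show (Int.ofNat k) = ((k : Nat) : Int) from rfl]
      push_cast; ring
    have hget : PySem.List.pyGetD nums (Int.ofNat k) 0 = nums[k] := by
      rw [show (Int.ofNat k) = ((k : Nat) : Int) from rfl, PySem.List.pyGetD_natCast]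
      simp [List.getD, List.getElem?_eq_getElem hlt]
    have hsum : pvPref nums k + nums[k] = pvPref nums (k + 1) := by
      unfold pvPref; rw [List.sum_take_succ nums k hlt]
    rw [hrc, List.map_append]
    rw [List.foldl_append, ih (by omega)]
    simp only [List.map_cons, List.map_nil, List.foldl_cons, List.foldl_nil,
      List.reverse_cons, List.reverse_append, List.reverse_nil, List.nil_append,
      List.cons_append, List.find?_cons]
    rw [hcast, hget, hsum, show (Int.ofNat (k + 1)) = ((k + 1 : Nat) : Int) from rfl,
      hs (k + 1) (by omega)]
    by_cases hc : pvPref nums (k + 1) = pvSufp nums (k + 1)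
    · simp [hc, pvP]
    · simp [hc, pvP]

-- ===== VERDICT (by name: the statement is the Claim_ definition above) =====
theorem SmallestBalancedIndex_spec : Claim_equal_SmallestBalancedIndex := by
  unfold Claim_equal_SmallestBalancedIndex
  intro nums _ hpre
  unfold Spec_SmallestBalancedIndex
  have hlen : 1 ≤ nums.length := List.length_pos_iff.mpr hpre
  simp only [SmallestBalancedIndex, SmallestBalancedIndex_alt]
  -- the suffix list B builds is the table of suffix products
  have ht : nums.tail.length + 1 = nums.length := by rw [List.length_tail]; omega
  have hsuf : ((PySem.List.slice nums (some 1) none).reverse.foldl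
      (fun (st : Int × List Int) x => (st.1 * x, st.2 ++ [st.1 * x])) (1, [1])).2.reverse
      = (List.range nums.length).map (fun k => pvSufp nums k) := by
    rw [PySem.List.slice_from_one, pvSuffixFold nums.tail]
    dsimp only
    rw [List.reverse_reverse, ht]
    congr 1
    funext k
    show (nums.tail.drop k).prod = pvSufp nums k
    rw [← List.drop_one, List.drop_drop]
    simp [pvSufp, Nat.add_comm]
  rw [hsuf]
  have hs : ∀ i : Nat, i < nums.length →
      PySem.List.pyGetD ((List.range nums.length).map (fun k => pvSufp nums k)) (i : Int) 0
        = pvSufp nums i := by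
    intro i hi
    rw [PySem.List.pyGetD_natCast]
    exact PySem.List.getD_map_range _ _ _ _ hi
  -- the two index ranges are the same ascending list, reversed for A
  have hasc : PySem.List.pyRange 1 ((nums.length : Int) - 1) 1
      = (List.range' 1 (nums.length - 2)).map Int.ofNat := by
    rw [PySem.List.pyRange_one, List.range'_eq_map_range, List.map_map]
    rw [show ((nums.length : Int) - 1 - 1).toNat = nums.length - 2 by omega]
    congr 1
  have hdesc : PySem.List.pyRange ((nums.length : Int) - 2) 0 (-1)
      = ((List.range' 1 (nums.length - 2)).map Int.ofNat).reverse := by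
    rw [PySem.List.pyRange_neg_one_eq_reverse,
      show ((0 : Int) + 1) = 1 from rfl,
      show ((nums.length : Int) - 2 + 1) = (nums.length : Int) - 1 by ring, hasc]
  rw [hdesc, hasc]
  have hsum0 : List.foldl (fun s i => s + PySem.List.pyGetD nums i 0) 0
      (PySem.List.pyRange ((nums.length : Int) - 2) (-1) (-1)) = pvPref nums (nums.length - 1) := by
    rw [PySem.List.pyRange_neg_one_eq_reverse,
      show ((-1 : Int) + 1) = 0 from rfl,
      show ((nums.length : Int) - 2 + 1) = (nums.length : Int) - 1 by ring,
      pvFoldAdd (fun i => PySem.List.pyGetD nums i 0) _ 0]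
    rw [List.map_reverse, List.sum_reverse,
      show ((nums.length : Int) - 1) = ((nums.length - 1 : Nat) : Int) by omega,
      pvMapRange nums (nums.length - 1) (by omega)]
    simp [pvPref]
  rw [hsum0]
  by_cases h2 : 2 ≤ nums.length
  · have hmlt : nums.length - 1 < nums.length := by omega
    have hprod : PySem.List.pyGetD nums ((nums.length : Int) - 1) 0
        = pvSufp nums (nums.length - 2) := by
      rw [show ((nums.length : Int) - 1) = ((nums.length - 1 : Nat) : Int) by omega,
        PySem.List.pyGetD_natCast]
      unfold pvSufp
      rw [show nums.length - 2 + 1 = nums.length - 1 by omega,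
        List.drop_eq_getElem_cons hmlt,
        show nums.length - 1 + 1 = nums.length by omega, List.drop_length]
      simp [List.getD, List.getElem?_eq_getElem hmlt]
    rw [hprod, show nums.length - 1 = nums.length - 2 + 1 by omega,
      pvALoop_eq nums (nums.length - 2) (by omega),
      pvBLoop_eq nums _ hs (nums.length - 2) (by omega) (-1)]
  · have hm : nums.length - 2 = 0 := by omega
    simp [hm, pvALoop]
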